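-- pv_equiv track=rewrite | github.com/StevenLee1208/CathyBankQATEST | CathyBank.py | celebrate
-- ===== SOURCE A (Python) =====
-- def celebrate(celebrate_string):
--     # 國泰銀行要慶祝六十周年，需要買字母貼紙來布置活動空間，文字為"Hello welcome to Cathay 60th year anniversary"，請寫一個程式計算每個字母(大小寫視為同個字母)出現次數
--     ## 邏輯是因題目說大小寫視為同個字母 先全部變成大寫 然後存成字典變成key是字 value是數量 然後再把它組成字串印出
--     celebrate_string = celebrate_string.upper()
--     caculate_string_dic = {}
--     for char in celebrate_string:
--         if char.isalnum():  # 判斷是不是數字或字母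
--             if char in caculate_string_dic:
--                 caculate_string_dic[char] += 1
--             else:
--                 caculate_string_dic[char] = 1
--     sorted_items = sorted(caculate_string_dic.items())
--     formatted_items = [f"{key} {value}" for key, value in sorted_items]
--     result = "\n".join(formatted_items)
--     return result
-- ===== SOURCE B (Python) =====
-- from itertools import groupby
--
-- def celebrate(celebrate_string):
--     chars = sorted(c for c in celebrate_string.upper() if c.isalnum())
--     return "\n".join(f"{c} {len(list(g))}" for c, g in groupby(chars))
-- ===== Notes on version B (the rewrite author's own statement) =====
-- stated objective: alternative
-- what changed: B replaces A's dict-accumulate-then-sort-keys strategy by sorting the filtered uppercased characters themselves and grouping equal runs with itertools.groupby, emitting one line per run.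
import Mathlib
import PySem

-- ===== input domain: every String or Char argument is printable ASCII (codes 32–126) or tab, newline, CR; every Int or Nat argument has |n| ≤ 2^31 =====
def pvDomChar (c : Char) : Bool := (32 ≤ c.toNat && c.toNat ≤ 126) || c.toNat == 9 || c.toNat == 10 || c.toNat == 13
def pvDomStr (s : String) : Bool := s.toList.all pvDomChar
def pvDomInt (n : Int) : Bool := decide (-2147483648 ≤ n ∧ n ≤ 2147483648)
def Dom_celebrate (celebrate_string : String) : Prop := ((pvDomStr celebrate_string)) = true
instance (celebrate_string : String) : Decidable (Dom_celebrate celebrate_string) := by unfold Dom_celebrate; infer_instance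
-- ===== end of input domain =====

-- B sorts the filtered uppercased characters and groups equal runs instead of A's dict-count-then-sort-keys; objective: alternative algorithm of similar cost.

-- ===== PORT A =====
def celebrate (celebrate_string : String) : String :=
  let up := PySem.Str.upper celebrate_string
  let dic := up.toList.foldl
    (fun (d : PySem.Dict Char Int) char =>
      if PySem.Str.isalnum char then
        if d.contains char then d.insert char (d.getD char 0 + 1)
        else d.insert char 1
      else d)
    PySem.Dict.empty
  let sorted_items := PySem.List.sorted2 dic.items Prod.fst Prod.snd
  let formatted_items := sorted_items.map (fun kv => String.ofList [kv.1] ++ " " ++ PySem.Int.toStr kv.2)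
  PySem.Str.join "\n" formatted_items

-- ===== PORT B =====
-- port of itertools.groupby over a list of chars: one (head, run length) pair per maximal equal run
def groupRuns : List Char → List (Char × Int)
  | [] => []
  | c :: rest =>
      (c, 1 + ((rest.takeWhile (fun d => d == c)).length : Int)) ::
        groupRuns (rest.dropWhile (fun d => d == c))
  termination_by cs => cs.length
  decreasing_by simpa using Nat.lt_succ_of_le (List.length_dropWhile_le _ _)

def celebrate_alt (celebrate_string : String) : String :=
  let chars := PySem.List.sorted
    ((PySem.Str.upper celebrate_string).toList.filter (fun c => PySem.Str.isalnum c))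
    (fun c => c)
  PySem.Str.join "\n"
    ((groupRuns chars).map (fun kv => String.ofList [kv.1] ++ " " ++ PySem.Int.toStr kv.2))

-- ===== PRECONDITION & SPEC =====
def Spec_celebrate (celebrate_string : String) (out : String) : Prop := out = celebrate_alt celebrate_string
instance (celebrate_string : String) (out : String) : Decidable (Spec_celebrate celebrate_string out) := by unfold Spec_celebrate; infer_instance

-- ===== CLAIM (what is proved, stated in full; the proofs are below) =====
def Claim_equal_celebrate : Prop := ∀ (celebrate_string : String), Dom_celebrate celebrate_string → Spec_celebrate celebrate_string (celebrate celebrate_string)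

-- ===== LEMMAS AND PROOFS =====

lemma getD_zero_of_not_contains (d : PySem.Dict Char Int) (c : Char)
    (h : d.contains c = false) : d.getD c 0 = 0 := by
  have hf : d.items.find? (fun p => p.1 == c) = none := by
    apply List.find?_eq_none.mpr
    intro p hp
    simp only [PySem.Dict.contains, List.any_eq_false] at h
    exact h p hp
  simp [PySem.Dict.getD, PySem.Dict.get?, hf]

lemma dict_fold_eq_counter (xs : List Char) :
    xs.foldl
      (fun (d : PySem.Dict Char Int) char =>
        if d.contains char then d.insert char (d.getD char 0 + 1)
        else d.insert char 1)
      PySem.Dict.empty = PySem.Dict.counter xs := by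
  have hfun : (fun (d : PySem.Dict Char Int) char =>
      if d.contains char then d.insert char (d.getD char 0 + 1) else d.insert char 1)
      = (fun (d : PySem.Dict Char Int) char => d.insert char (d.getD char 0 + 1)) := by
    funext d c
    by_cases h : d.contains c
    · simp [h]
    · simp only [Bool.not_eq_true] at h
      simp [h, getD_zero_of_not_contains d c h]
  rw [hfun, PySem.Dict.foldl_insert_getD_add_one_eq_counter]

lemma insertBy_congr {α : Type} (p q : α → α → Bool) (x : α) (acc : List α)
    (h : ∀ b ∈ acc, p x b = q x b) :
    PySem.List.insertBy p x acc = PySem.List.insertBy q x acc := by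
  induction acc with
  | nil => rfl
  | cons y ys ih =>
    simp only [PySem.List.insertBy]
    rw [h y (List.mem_cons_self ..)]
    split
    · rfl
    · rw [ih (fun b hb => h b (List.mem_cons_of_mem _ hb))]

lemma foldl_insertBy_congr {α : Type} (p q : α → α → Bool) (S : List α)
    (hpq : ∀ a ∈ S, ∀ b ∈ S, p a b = q a b) :
    ∀ (xs acc : List α), (∀ x ∈ xs, x ∈ S) → (∀ x ∈ acc, x ∈ S) →
      xs.foldl (fun acc x => PySem.List.insertBy p x acc) acc
        = xs.foldl (fun acc x => PySem.List.insertBy q x acc) acc := by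
  intro xs
  induction xs with
  | nil => intro acc _ _; rfl
  | cons x xs ih =>
    intro acc hxs hacc
    simp only [List.foldl_cons]
    have hxS : x ∈ S := hxs x (List.mem_cons_self ..)
    rw [insertBy_congr p q x acc (fun b hb => hpq x hxS b (hacc b hb))]
    apply ih
    · intro y hy; exact hxs y (List.mem_cons_of_mem _ hy)
    · intro y hy
      rcases (PySem.List.mem_insertBy q x y acc).1 hy with h | h
      · exact h ▸ hxS
      · exact hacc y h

lemma sorted2_eq_sorted_fst (items : List (Char × Int))
    (hinj : ∀ a ∈ items, ∀ b ∈ items, a.1 = b.1 → a = b) :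
    PySem.List.sorted2 items Prod.fst Prod.snd = PySem.List.sorted items Prod.fst := by
  show items.foldl (fun acc x => PySem.List.insertBy _ x acc) []
      = items.foldl (fun acc x => PySem.List.insertBy _ x acc) []
  apply foldl_insertBy_congr _ _ items ?_ items [] (fun x hx => hx) (by simp)
  intro a ha b hb
  rcases lt_trichotomy a.1 b.1 with h | h | h
  · simp [h, asymm h]
  · have : a = b := hinj a ha b hb h
    subst this
    simp
  · simp [h, asymm h]

-- core facts about groupRuns on a weakly increasing character list
lemma groupRuns_props (cs : List Char) (h : cs.Pairwise (· ≤ ·)) :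
    (∀ p ∈ groupRuns cs, p.1 ∈ cs ∧ p.2 = (cs.count p.1 : Int)) ∧
    (∀ k ∈ cs, k ∈ (groupRuns cs).map Prod.fst) ∧
    (groupRuns cs).Pairwise (fun a b => a.1 < b.1) := by
  induction cs using groupRuns.induct with
  | case1 => simp [groupRuns]
  | case2 c rest ih =>
    rw [List.pairwise_cons] at h
    obtain ⟨hle, hrest⟩ := h
    set run := rest.takeWhile (fun d => d == c) with hrun
    set rest' := rest.dropWhile (fun d => d == c) with hrest'
    have hsplit : run ++ rest' = rest := List.takeWhile_append_dropWhile ..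
    have hrunc : ∀ e ∈ run, e = c := by
      intro e he
      have := List.mem_takeWhile_imp he
      simpa using this
    have hrest'mem : ∀ e ∈ rest', e ∈ rest := by
      intro e he; rw [← hsplit]; exact List.mem_append_right _ he
    have hgt : ∀ e ∈ rest', c < e := by
      intro e he
      cases hr : rest' with
      | nil => simp [hr] at he
      | cons h0 t0 =>
        have hh0ne : (h0 == c) = false := by
          have := List.head?_dropWhile_not (fun d => d == c) rest
          rw [← hrest', hr] at this
          simpa using this
        have hh0c : h0 ≠ c := by simpa using hh0ne
        have hh0 : c < h0 := lt_of_le_of_ne (hle h0 (hrest'mem h0 (by simp [hr])))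
          (Ne.symm hh0c)
        have hpw : rest'.Pairwise (· ≤ ·) :=
          List.Pairwise.sublist (List.dropWhile_sublist _) hrest
        rw [hr, List.pairwise_cons] at hpw
        rw [hr] at he
        rcases List.mem_cons.1 he with rfl | he'
        · exact hh0
        · exact lt_of_lt_of_le hh0 (hpw.1 e he')
    have hcnotin : c ∉ rest' := fun hc => lt_irrefl c (hgt c hc)
    have hccount : (c :: rest).count c = 1 + run.length := by
      rw [List.count_cons_self, ← hsplit, List.count_append]
      have h1 : run.count c = run.length := by
        rw [List.count_eq_length]
        intro e he; exact ((hrunc e he) ▸ rfl : c = e) ▸ rfl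
      have h2 : rest'.count c = 0 := List.count_eq_zero.2 hcnotin
      omega
    have hkcount : ∀ k, k ≠ c → (c :: rest).count k = rest'.count k := by
      intro k hk
      have h0 : run.count k = 0 := List.count_eq_zero.2 (fun hkr => hk (hrunc k hkr))
      have hck : (c == k) = false := by simpa using Ne.symm hk
      rw [← hsplit, List.count_cons, List.count_append, h0, hck]
      simp
    have hrest'pw : rest'.Pairwise (· ≤ ·) :=
      List.Pairwise.sublist (List.dropWhile_sublist _) hrest
    obtain ⟨ih1, ih2, ih3⟩ := ih hrest'pw
    refine ⟨?_, ?_, ?_⟩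
    · intro p hp
      rw [groupRuns] at hp
      rcases List.mem_cons.1 hp with rfl | hp'
      · refine ⟨List.mem_cons_self .., ?_⟩
        simp only [← hrun]
        rw [hccount]; push_cast; ring
      · obtain ⟨hmem, hcnt⟩ := ih1 p hp'
        have hne : p.1 ≠ c := fun he => lt_irrefl c (he ▸ hgt p.1 hmem)
        refine ⟨List.mem_cons_of_mem _ (hrest'mem _ hmem), ?_⟩
        rw [hkcount p.1 hne]; exact hcnt
    · intro k hk
      rw [groupRuns]
      rcases List.mem_cons.1 hk with rfl | hk'
      · simp
      · by_cases hkc : k = c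
        · simp [hkc]
        · have hk'' : k ∈ rest' := by
            rw [← hsplit] at hk'
            rcases List.mem_append.1 hk' with h | h
            · exact absurd (hrunc k h) hkc
            · exact h
          simp only [List.map_cons, List.mem_cons]
          exact Or.inr (ih2 k hk'')
    · rw [groupRuns, List.pairwise_cons]
      refine ⟨?_, ih3⟩
      intro p hp
      exact hgt p.1 (ih1 p hp).1

lemma counter_items_fst_inj (xs : List Char) :
    ∀ a ∈ (PySem.Dict.counter xs).items, ∀ b ∈ (PySem.Dict.counter xs).items,
      a.1 = b.1 → a = b := by
  intro a ha b hb hab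
  rw [PySem.Dict.items_counter] at ha hb
  obtain ⟨ka, hka, rfl⟩ := List.mem_map.1 ha
  obtain ⟨kb, hkb, rfl⟩ := List.mem_map.1 hb
  simp only at hab
  subst hab
  rfl

-- the heart: A's sorted dict items = B's runs of the sorted character list
lemma sorted_items_eq_groupRuns (xs : List Char) :
    PySem.List.sorted2 (PySem.Dict.counter xs).items Prod.fst Prod.snd
      = groupRuns (PySem.List.sorted xs (fun c => c)) := by
  set cs := PySem.List.sorted xs (fun c => c) with hcs
  have hpw : cs.Pairwise (· ≤ ·) := by
    simpa using PySem.List.sorted_pairwise xs (fun c => c)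
  have hperm : cs.Perm xs := PySem.List.sorted_perm xs (fun c => c) false
  obtain ⟨h1, h2, h3⟩ := groupRuns_props cs hpw
  rw [sorted2_eq_sorted_fst _ (counter_items_fst_inj xs)]
  apply PySem.List.sorted_eq_of_perm_of_pairwise_lt _ _ _ ?_ h3
  -- Perm: groupRuns cs ~ (counter xs).items
  have hG : groupRuns cs
      = ((groupRuns cs).map Prod.fst).map (fun k => (k, (xs.count k : Int))) := by
    rw [List.map_map]
    calc groupRuns cs = (groupRuns cs).map id := by rw [List.map_id]
    _ = (groupRuns cs).map ((fun k => (k, (xs.count k : Int))) ∘ Prod.fst) := by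
        apply List.map_congr_left
        intro p hp
        obtain ⟨_, hcnt⟩ := h1 p hp
        have : cs.count p.1 = xs.count p.1 := hperm.count_eq p.1
        simp only [Function.comp, id_eq]
        rw [← this, ← hcnt]
  rw [hG, PySem.Dict.items_counter]
  apply List.Perm.map
  have hnodupG : ((groupRuns cs).map Prod.fst).Nodup :=
    (List.pairwise_map.2 h3).imp (fun h => ne_of_lt h)
  rw [List.perm_ext_iff_of_nodup hnodupG (PySem.Set.nodup_ofList xs)]
  intro k
  rw [PySem.Set.mem_ofList]
  constructor
  · intro hk
    obtain ⟨p, hp, rfl⟩ := List.mem_map.1 hk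
    exact hperm.mem_iff.1 (h1 p hp).1
  · intro hk
    exact h2 k (hperm.mem_iff.2 hk)

-- ===== VERDICT (by name: the statement is the Claim_ definition above) =====
theorem celebrate_spec : Claim_equal_celebrate := by
  intro s _
  show celebrate s = celebrate_alt s
  simp only [celebrate, celebrate_alt]
  rw [← List.foldl_filter, dict_fold_eq_counter, sorted_items_eq_groupRuns]
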